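-- pv_equiv track=rewrite | github.com/yohannes-07/ai-classification | bbc/bbc_naive_bayes/NB_named_entities.py | extract_named_entities
-- ===== SOURCE A (Python) =====
-- def extract_named_entities(text):
--     entities = []
--     words = text.split()
--     current_entity = ""
--     current_label = None
--     for word in words:
--         if word.isupper():
--             if current_entity:
--                 entities.append((current_entity, current_label))
--                 current_entity = ""
--             current_entity = word
--             current_label = "ORG"
--         elif current_entity:
--             current_entity += " " + word
--     if current_entity:
--         entities.append((current_entity, current_label))
--     return entities
-- ===== SOURCE B (Python) =====
-- def extract_named_entities(text):
--     words = text.split()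
--     starts = [i for i, w in enumerate(words) if w.isupper()]
--     out = []
--     for j, s in enumerate(starts):
--         end = starts[j + 1] if j + 1 < len(starts) else len(words)
--         out.append((" ".join(words[s:end]), "ORG"))
--     return out
-- ===== Notes on version B (the rewrite author's own statement) =====
-- stated objective: alternative
-- what changed: Replaces A's single pass with a running string accumulator and label state by a two-pass decomposition: first collect the indices of uppercase words, then emit one (joined slice, 'ORG') pair per consecutive pair of start indices.
import Mathlib
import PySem

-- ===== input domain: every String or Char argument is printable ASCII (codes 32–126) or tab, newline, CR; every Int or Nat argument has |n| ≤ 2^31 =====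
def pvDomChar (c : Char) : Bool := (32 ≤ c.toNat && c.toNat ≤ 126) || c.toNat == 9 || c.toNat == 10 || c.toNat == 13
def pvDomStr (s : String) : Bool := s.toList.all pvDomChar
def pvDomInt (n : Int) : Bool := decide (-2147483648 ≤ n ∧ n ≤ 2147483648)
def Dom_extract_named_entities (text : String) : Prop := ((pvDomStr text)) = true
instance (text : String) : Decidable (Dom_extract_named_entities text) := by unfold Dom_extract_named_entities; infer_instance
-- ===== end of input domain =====

-- B replaces A's running string accumulator by a two-pass decomposition (collect uppercase start
-- indices, then join slices between consecutive starts); objective: alternative decomposition.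


-- ===== PORT A =====
-- str.isupper(): at least one cased char and no lowercase char — exact on the ASCII domain
def pyIsupper (w : String) : Bool :=
  w.toList.any PySem.Chars.isupper && w.toList.all (fun c => !PySem.Chars.islower c)

-- the body of A's for-loop, on state (entities, current_entity, current_label)
def stepA (st : List (String × Option String) × String × Option String) (word : String) :
    List (String × Option String) × String × Option String :=
  if pyIsupper word then
    ((if st.2.1 ≠ "" then st.1 ++ [(st.2.1, st.2.2)] else st.1), word, some "ORG")
  else if st.2.1 ≠ "" then (st.1, st.2.1 ++ " " ++ word, st.2.2)
  else st

-- the trailing 'if current_entity: entities.append(...)'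
def finishA (st : List (String × Option String) × String × Option String) :
    List (String × Option String) :=
  if st.2.1 ≠ "" then st.1 ++ [(st.2.1, st.2.2)] else st.1

def extract_named_entities (text : String) : List (String × Option String) :=
  let words := PySem.Str.split₀ text
  finishA (words.foldl stepA ([], "", none))

-- ===== PORT B =====
-- the body of B's for-loop over enumerate(starts): p = (j, s)
def fB (words : List String) (starts : List Int) (p : Int × Int) : String × Option String :=
  let e : Int :=
    if p.1 + 1 < (starts.length : Int) then PySem.List.pyGetD starts (p.1 + 1) 0
    else (words.length : Int)
  (PySem.Str.join " " (PySem.List.slice words (some p.2) (some e)), some "ORG")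

def extract_named_entities_alt (text : String) : List (String × Option String) :=
  let words := PySem.Str.split₀ text
  let starts := ((PySem.List.enumerate words 0).filter (fun p => pyIsupper p.2)).map (·.1)
  (PySem.List.enumerate starts 0).map (fB words starts)

-- ===== PRECONDITION & SPEC =====
def Spec_extract_named_entities (text : String) (out : List (String × Option String)) : Prop := out = extract_named_entities_alt text
instance (text : String) (out : List (String × Option String)) : Decidable (Spec_extract_named_entities text out) := by unfold Spec_extract_named_entities; infer_instance

-- ===== CLAIM (what is proved, stated in full; the proofs are below) =====
def Claim_equal_extract_named_entities : Prop := ∀ (text : String), Dom_extract_named_entities text → Spec_extract_named_entities text (extract_named_entities text)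

-- ===== LEMMAS AND PROOFS =====

-- start positions of entity groups: indices (from k) of uppercase words
def SNat (k : Nat) : List String → List Nat
  | [] => []
  | w :: ws => if pyIsupper w then k :: SNat (k+1) ws else SNat (k+1) ws

-- A's result from a running group (cur, lab) onward
def buildA (cur : String) (lab : Option String) : List String → List (String × Option String)
  | [] => [(cur, lab)]
  | w :: ws => if pyIsupper w then (cur, lab) :: buildA w (some "ORG") ws
               else buildA (cur ++ " " ++ w) lab ws

-- A's result with no group open
def groupsB : List String → List (String × Option String)
  | [] => []
  | w :: ws => if pyIsupper w then buildA w (some "ORG") ws else groupsB ws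

-- B's result read off a list of start indices
def chop (words : List String) : List Nat → List (String × Option String)
  | [] => []
  | [s] => [(PySem.Str.join " " (PySem.List.slice words (some (s:Int)) (some ((words.length : Nat):Int))), some "ORG")]
  | s :: t :: rest =>
      (PySem.Str.join " " (PySem.List.slice words (some (s:Int)) (some ((t:Nat):Int))), some "ORG") :: chop words (t :: rest)

def natCastL (l : List Nat) : List Int := l.map (fun n => Int.ofNat n)

theorem natCastL_nil : natCastL [] = [] := rfl

theorem natCastL_cons (s : Nat) (l : List Nat) : natCastL (s :: l) = (s : Int) :: natCastL l := rfl

theorem length_natCastL (l : List Nat) : (natCastL l).length = l.length := by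
  simp [natCastL]

theorem isupper_ne_empty {w : String} (h : pyIsupper w = true) : w ≠ "" := by
  intro he; subst he; simp [pyIsupper] at h

theorem append_sep_ne_empty (a b : String) : a ++ " " ++ b ≠ "" := by
  intro h
  have := congrArg String.length h
  simp [String.length_append] at this

theorem foldA_open (ws : List String) :
    ∀ (ents : List (String × Option String)) (cur : String) (lab : Option String), cur ≠ "" →
    finishA (List.foldl stepA (ents, cur, lab) ws) = ents ++ buildA cur lab ws := by
  induction ws with
  | nil => intro ents cur lab hcur; simp [finishA, buildA, hcur]
  | cons w ws ih =>
    intro ents cur lab hcur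
    rw [List.foldl_cons]
    by_cases hw : pyIsupper w
    · rw [show stepA (ents, cur, lab) w = (ents ++ [(cur, lab)], w, some "ORG") by
        simp [stepA, hw, hcur]]
      rw [ih _ _ _ (isupper_ne_empty hw),
        show buildA cur lab (w :: ws) = (cur, lab) :: buildA w (some "ORG") ws by
          simp [buildA, hw]]
      simp
    · rw [show stepA (ents, cur, lab) w = (ents, cur ++ " " ++ w, lab) by
        simp [stepA, hw, hcur]]
      rw [ih _ _ _ (append_sep_ne_empty cur w),
        show buildA cur lab (w :: ws) = buildA (cur ++ " " ++ w) lab ws by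
          simp [buildA, hw]]

theorem foldA_closed (ws : List String) :
    ∀ (ents : List (String × Option String)) (lab : Option String),
    finishA (List.foldl stepA (ents, "", lab) ws) = ents ++ groupsB ws := by
  induction ws with
  | nil => intro ents lab; simp [finishA, groupsB]
  | cons w ws ih =>
    intro ents lab
    rw [List.foldl_cons]
    by_cases hw : pyIsupper w
    · rw [show stepA (ents, "", lab) w = (ents, w, some "ORG") by simp [stepA, hw]]
      rw [foldA_open ws ents w (some "ORG") (isupper_ne_empty hw),
        show groupsB (w :: ws) = buildA w (some "ORG") ws by simp [groupsB, hw]]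
    · rw [show stepA (ents, "", lab) w = (ents, "", lab) by simp [stepA, hw]]
      rw [ih ents lab, show groupsB (w :: ws) = groupsB ws by simp [groupsB, hw]]

theorem S_int (ws : List String) : ∀ (k : Nat),
    ((PySem.List.enumerate ws (k:Int)).filter (fun p => pyIsupper p.2)).map (·.1)
      = natCastL (SNat k ws) := by
  induction ws with
  | nil => intro k; simp [SNat, natCastL, PySem.List.enumerate_nil]
  | cons w ws ih =>
    intro k
    rw [PySem.List.enumerate_cons,
      show ((k:Int) + 1) = ((k+1 : Nat) : Int) by push_cast; ring, List.filter_cons]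
    by_cases hw : pyIsupper w
    · rw [if_pos (show pyIsupper (((k:Int), w) : Int × String).2 = true from hw),
        List.map_cons, ih (k+1),
        show SNat k (w :: ws) = k :: SNat (k+1) ws by simp [SNat, hw], natCastL_cons]
    · rw [if_neg (show ¬ pyIsupper (((k:Int), w) : Int × String).2 = true from hw), ih (k+1),
        show SNat k (w :: ws) = SNat (k+1) ws by simp [SNat, hw]]

theorem mapf (words : List String) : ∀ (tail pre : List Nat),
    (PySem.List.enumerate (natCastL tail) ((pre.length : Int))).map
      (fB words (natCastL (pre ++ tail)))
      = chop words tail := by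
  intro tail
  induction tail with
  | nil => intro pre; simp [chop, natCastL, PySem.List.enumerate_nil]
  | cons s tail ih =>
    intro pre
    rw [natCastL_cons, PySem.List.enumerate_cons, List.map_cons]
    cases tail with
    | nil =>
      have hcond : ¬ ((pre.length : Int) + 1 < ((natCastL (pre ++ [s])).length : Int)) := by
        rw [length_natCastL, List.length_append, List.length_singleton]
        push_cast; omega
      rw [natCastL_nil, PySem.List.enumerate_nil, List.map_nil, chop]
      congr 1
      simp only [fB]
      rw [if_neg hcond]
    | cons t rest =>
      have hcond : ((pre.length : Int) + 1 < ((natCastL (pre ++ s :: t :: rest)).length : Int)) := by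
        rw [length_natCastL, List.length_append, List.length_cons, List.length_cons]
        push_cast; omega
      have hget : PySem.List.pyGetD (natCastL (pre ++ s :: t :: rest)) ((pre.length : Int) + 1) 0
          = ((t : Nat) : Int) := by
        rw [show ((pre.length : Int) + 1) = ((pre.length + 1 : Nat) : Int) by push_cast; ring,
          PySem.List.pyGetD_natCast]
        have h1 : (natCastL (pre ++ s :: t :: rest))[pre.length + 1]? = some ((t:Nat):Int) := by
          unfold natCastL
          rw [List.getElem?_map, List.getElem?_append_right (by omega)]
          simp
        rw [List.getD, h1]
        rfl
      have htail := ih (pre ++ [s])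
      rw [List.append_assoc, List.singleton_append, List.length_append,
        List.length_singleton] at htail
      rw [chop]
      congr 1
      simp only [fB]
      rw [if_pos hcond, hget]

-- chars-level: join sep (a :: (l ++ [w])) = join sep (a :: l) ++ sep ++ w
theorem chars_join_append_singleton (sep w : List Char) :
    ∀ (l : List (List Char)) (a : List Char),
    PySem.Chars.join sep (a :: (l ++ [w])) = PySem.Chars.join sep (a :: l) ++ sep ++ w := by
  intro l
  induction l with
  | nil => intro a; simp [PySem.Chars.join_cons_cons, PySem.Chars.join_singleton]
  | cons b l ih =>
    intro a
    rw [List.cons_append, PySem.Chars.join_cons_cons, ih b, PySem.Chars.join_cons_cons]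
    simp [List.append_assoc]

theorem str_join_singleton (w : String) : PySem.Str.join " " [w] = w := by
  apply String.ext
  have := PySem.Str.toList_join (" ") [w]
  simpa [PySem.Chars.join_singleton] using this

theorem str_join_append_singleton (b : List String) (hb : b ≠ []) (w : String) :
    PySem.Str.join " " (b ++ [w]) = PySem.Str.join " " b ++ " " ++ w := by
  cases b with
  | nil => exact absurd rfl hb
  | cons a l =>
    apply String.ext
    simp [PySem.Str.toList_join, chars_join_append_singleton]

-- slice of the middle block: (pre ++ b ++ rest)[|pre| : |pre|+|b|] = b
theorem slice_middle (pre b rest : List String) :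
    PySem.List.slice (pre ++ b ++ rest) (some ((pre.length : Nat) : Int))
      (some ((pre.length + b.length : Nat) : Int)) = b := by
  rw [PySem.List.slice_natCast, List.append_assoc, List.drop_left]
  rw [show pre.length + b.length - pre.length = b.length by omega, List.take_left]

theorem buildLemma : ∀ (ws pre b : List String), b ≠ [] →
    chop (pre ++ b ++ ws) (pre.length :: SNat (pre.length + b.length) ws)
      = buildA (PySem.Str.join " " b) (some "ORG") ws := by
  intro ws
  induction ws with
  | nil =>
    intro pre b hb
    rw [SNat, chop, buildA]
    have : PySem.List.slice (pre ++ b ++ ([] : List String)) (some ((pre.length : Nat) : Int))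
        (some (((pre ++ b ++ ([] : List String)).length : Nat) : Int)) = b := by
      rw [show ((pre ++ b ++ ([] : List String)).length) = pre.length + b.length by simp]
      exact slice_middle pre b []
    rw [this]
  | cons w ws ih =>
    intro pre b hb
    by_cases hw : pyIsupper w
    · rw [show SNat (pre.length + b.length) (w :: ws)
          = (pre.length + b.length) :: SNat (pre.length + b.length + 1) ws by simp [SNat, hw]]
      rw [chop, slice_middle pre b (w :: ws)]
      have h2 := ih (pre ++ b) [w] (by simp)
      rw [List.append_assoc (pre ++ b) [w] ws, List.singleton_append, List.length_append,
        List.length_singleton, str_join_singleton] at h2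
      rw [show buildA (PySem.Str.join " " b) (some "ORG") (w :: ws)
          = (PySem.Str.join " " b, some "ORG") :: buildA w (some "ORG") ws by simp [buildA, hw]]
      rw [h2]
    · rw [show SNat (pre.length + b.length) (w :: ws) = SNat (pre.length + b.length + 1) ws by
        simp [SNat, hw]]
      have h2 := ih pre (b ++ [w]) (by simp)
      rw [← List.append_assoc pre b [w], List.append_assoc (pre ++ b) [w] ws,
        List.singleton_append, List.length_append, List.length_singleton, ← Nat.add_assoc,
        str_join_append_singleton b hb w] at h2
      rw [show buildA (PySem.Str.join " " b) (some "ORG") (w :: ws)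
          = buildA (PySem.Str.join " " b ++ " " ++ w) (some "ORG") ws by simp [buildA, hw]]
      exact h2

theorem groupsLemma : ∀ (ws pre : List String),
    chop (pre ++ ws) (SNat pre.length ws) = groupsB ws := by
  intro ws
  induction ws with
  | nil => intro pre; rw [SNat, chop, groupsB]
  | cons w ws ih =>
    intro pre
    by_cases hw : pyIsupper w
    · rw [show SNat pre.length (w :: ws) = pre.length :: SNat (pre.length + 1) ws by
        simp [SNat, hw]]
      have h2 := buildLemma ws pre [w] (by simp)
      rw [List.append_assoc pre [w] ws, List.singleton_append, List.length_singleton,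
        str_join_singleton] at h2
      rw [h2, show groupsB (w :: ws) = buildA w (some "ORG") ws by simp [groupsB, hw]]
    · rw [show SNat pre.length (w :: ws) = SNat (pre.length + 1) ws by simp [SNat, hw]]
      have h2 := ih (pre ++ [w])
      rw [List.append_assoc pre [w] ws, List.singleton_append, List.length_append,
        List.length_singleton] at h2
      rw [h2, show groupsB (w :: ws) = groupsB ws by simp [groupsB, hw]]

theorem main_eq (text : String) :
    extract_named_entities text = extract_named_entities_alt text := by
  show finishA (List.foldl stepA ([], "", none) (PySem.Str.split₀ text)) =
    (PySem.List.enumerate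
        (((PySem.List.enumerate (PySem.Str.split₀ text) 0).filter (fun p => pyIsupper p.2)).map (·.1)) 0).map
      (fB (PySem.Str.split₀ text)
        (((PySem.List.enumerate (PySem.Str.split₀ text) 0).filter (fun p => pyIsupper p.2)).map (·.1)))
  rw [foldA_closed]
  rw [show ((0:Int)) = (((0:Nat)) : Int) by norm_num, S_int]
  have h1 := mapf (PySem.Str.split₀ text) (SNat 0 (PySem.Str.split₀ text)) []
  rw [List.nil_append, List.length_nil] at h1
  rw [h1]
  have h2 := groupsLemma (PySem.Str.split₀ text) []
  rw [List.nil_append, List.length_nil] at h2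
  rw [h2, List.nil_append]

-- ===== VERDICT (by name: the statement is the Claim_ definition above) =====
theorem extract_named_entities_spec : Claim_equal_extract_named_entities := by
  intro text _
  show _ = _
  exact main_eq text
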